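-- pv_equiv track=rewrite | github.com/aim-samodelkin/divine_procurement | backend/app/jobs/discovery.py | build_tavily_context
-- ===== SOURCE A (Python) =====
-- MAX_CONTEXT_CHARS = 2000
--
-- CONTENT_SNIPPET_LEN = 500
--
-- def build_tavily_context(search_result_items: list[dict]) -> str:
--     """Build a bounded text blob for the LLM from Tavily search hits."""
--     parts: list[str] = []
--     total = 0
--     for item in search_result_items:
--         title = str(item.get("title") or "")
--         url = str(item.get("url") or "")
--         content = str(item.get("content") or "")[:CONTENT_SNIPPET_LEN]
--         chunk = f"Title: {title}\nURL: {url}\nContent: {content}\n---\n"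
--         if total + len(chunk) > MAX_CONTEXT_CHARS:
--             break
--         parts.append(chunk)
--         total += len(chunk)
--     return "\n".join(parts)
-- ===== SOURCE B (Python) =====
-- from itertools import accumulate
--
-- MAX_CONTEXT_CHARS = 2000
-- CONTENT_SNIPPET_LEN = 500
--
-- def _chunk(item):
--     title = str(item.get("title") or "")
--     url = str(item.get("url") or "")
--     content = str(item.get("content") or "")[:CONTENT_SNIPPET_LEN]
--     return f"Title: {title}\nURL: {url}\nContent: {content}\n---\n"
--
-- def build_tavily_context(search_result_items: list[dict]) -> str:
--     chunks = [_chunk(item) for item in search_result_items]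
--     totals = accumulate(len(c) for c in chunks)
--     cut = next((i for i, t in enumerate(totals) if t > MAX_CONTEXT_CHARS), len(chunks))
--     return "\n".join(chunks[:cut])
-- ===== Notes on version B (the rewrite author's own statement) =====
-- stated objective: alternative
-- what changed: A's single fused loop that accumulates length, appends and breaks on overflow is replaced by a map building all chunks, a cumulative-length pass, and a first-overflow cut index selecting the prefix to join.
import Mathlib
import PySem

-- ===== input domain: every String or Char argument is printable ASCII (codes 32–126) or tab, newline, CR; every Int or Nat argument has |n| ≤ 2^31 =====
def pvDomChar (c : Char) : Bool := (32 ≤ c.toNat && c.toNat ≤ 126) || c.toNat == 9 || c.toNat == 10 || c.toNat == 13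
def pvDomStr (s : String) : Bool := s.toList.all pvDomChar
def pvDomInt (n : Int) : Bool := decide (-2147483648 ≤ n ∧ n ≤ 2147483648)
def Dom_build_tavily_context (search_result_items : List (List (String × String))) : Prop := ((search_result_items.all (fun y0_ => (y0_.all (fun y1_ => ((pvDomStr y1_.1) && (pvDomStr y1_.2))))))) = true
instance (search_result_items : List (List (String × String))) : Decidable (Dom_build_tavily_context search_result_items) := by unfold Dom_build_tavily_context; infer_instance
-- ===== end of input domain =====

-- B replaces A's fused accumulate-and-break loop by a map to chunks plus a separate
-- cut-index computation over cumulative lengths (objective: alternative decomposition).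


-- ===== PORT A =====
-- chunk formatting shared by both Pythons (same line in Source A and Source B):
-- str(item.get(k) or "") is item.get(k, "") on string-valued dicts ('or ""' only replaces a
-- falsy value, and the only falsy string is "" itself; str() is identity on strings).
def pvChunk (item : List (String × String)) : List Char :=
  let title := (PySem.Dict.getD (PySem.Dict.mk item) "title" "").toList
  let url := (PySem.Dict.getD (PySem.Dict.mk item) "url" "").toList
  let content := PySem.List.slice (PySem.Dict.getD (PySem.Dict.mk item) "content" "").toList none (some 500)
  "Title: ".toList ++ title ++ "\nURL: ".toList ++ url ++ "\nContent: ".toList ++ content ++ "\n---\n".toList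

-- A's loop: append chunks while the running total stays within budget, break at first overflow
def pvGoA (items : List (List (String × String))) (parts : List (List Char)) (total : Nat) : List (List Char) :=
  match items with
  | [] => parts
  | it :: rest =>
    let chunk := pvChunk it
    if total + chunk.length > 2000 then parts
    else pvGoA rest (parts ++ [chunk]) (total + chunk.length)

def build_tavily_context (search_result_items : List (List (String × String))) : String :=
  String.ofList (PySem.Chars.join ['\n'] (pvGoA search_result_items [] 0))

-- ===== PORT B =====
-- running totals of the chunk lengths (itertools.accumulate in Source B)
def pvCumul (ls : List Nat) (total : Nat) : List Nat :=
  match ls with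
  | [] => []
  | n :: rest => (total + n) :: pvCumul rest (total + n)

def build_tavily_context_alt (search_result_items : List (List (String × String))) : String :=
  let chunks := search_result_items.map pvChunk
  let totals := pvCumul (chunks.map (·.length)) 0
  let cut := (totals.findIdx? (fun t => 2000 < t)).getD chunks.length
  String.ofList (PySem.Chars.join ['\n'] (chunks.take cut))

-- ===== PRECONDITION & SPEC =====
def Spec_build_tavily_context (search_result_items : List (List (String × String))) (out : String) : Prop := out = build_tavily_context_alt search_result_items
instance (search_result_items : List (List (String × String))) (out : String) : Decidable (Spec_build_tavily_context search_result_items out) := by unfold Spec_build_tavily_context; infer_instance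

-- ===== CLAIM (what is proved, stated in full; the proofs are below) =====
def Claim_equal_build_tavily_context : Prop := ∀ (search_result_items : List (List (String × String))), Dom_build_tavily_context search_result_items → Spec_build_tavily_context search_result_items (build_tavily_context search_result_items)

-- ===== LEMMAS AND PROOFS =====

-- A's break loop selects exactly the prefix of chunks before the first overflowing running total
theorem pvGoA_eq_take (items : List (List (String × String))) :
    ∀ (parts : List (List Char)) (total : Nat),
      pvGoA items parts total =
        parts ++ (items.map pvChunk).take
          (((pvCumul ((items.map pvChunk).map (·.length)) total).findIdx?
              (fun t => 2000 < t)).getD (items.map pvChunk).length) := by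
  induction items with
  | nil => intro parts total; simp [pvGoA, pvCumul]
  | cons it rest ih =>
    intro parts total
    simp only [pvGoA, List.map_cons, pvCumul, List.findIdx?_cons]
    by_cases h : total + (pvChunk it).length > 2000
    · simp [h]
    · have hd : decide (2000 < total + (pvChunk it).length) = false := by
        simpa using h
      simp only [if_neg h, hd, Bool.false_eq_true, if_false]
      rw [ih]
      rcases hfind : (pvCumul ((rest.map pvChunk).map (·.length)) (total + (pvChunk it).length)).findIdx? (fun t => 2000 < t) with _ | i <;>
        simp [List.take_succ_cons]

-- ===== VERDICT (by name: the statement is the Claim_ definition above) =====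
theorem build_tavily_context_spec : Claim_equal_build_tavily_context := by
  intro items _
  unfold Spec_build_tavily_context build_tavily_context build_tavily_context_alt
  rw [pvGoA_eq_take]
  simp
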